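-- pv_equiv track=rewrite | github.com/allen-adastra/risk_assess | risk_assess/random_objects/utils.py | tensor_to_array_idx
-- ===== SOURCE A (Python) =====
-- def tensor_to_array_idx(tensor_idx, dimension):
--     """ Given a moment tensor index, return the corresponding index in the
--         2D array representation of the tensor. This essentially comes down
--         to vieweing tensor_idx as a base-"dimension" number that should be
--         converted to decimal form, with a slight twist: we always set the
--         second dimension of tensor_idx to 0 in the conversion. This is because
--         the array form has two dimensions, it's a bit strange.
--
--     Args:
--         tensor_idx (tuple of ints): tensor index.
--         dimension (positive int): dimension of the random vector.
--     """
--     assert len(tensor_idx) > 0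
--
--     # The second dimension of the tensor does not get included
--     # in the conversion. To see this, consider the 2x2x2 case, where
--     # the array representation is 4x2.     decimal_expansion = 0
--     reduced_tensor_idx = list(tensor_idx)
--     if len(reduced_tensor_idx) > 1:
--         del reduced_tensor_idx[1]
--
--     # Make the conversion based off # https://www.rapidtables.com/convert/number/binary-to-decimal.html.
--     decimal_expansion = 0
--     for i, idx in enumerate(reduced_tensor_idx):
--         decimal_expansion += idx * dimension**i
--
--     assert dimension > 0
--     if dimension == 1 or len(tensor_idx)==1:
--         return (decimal_expansion,)
--     else:
--         return (decimal_expansion, tensor_idx[1])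
-- ===== SOURCE B (Python) =====
-- def tensor_to_array_idx(tensor_idx, dimension):
--     """Same conversion via Horner's method (no dimension**i powers)."""
--     assert len(tensor_idx) > 0
--     assert dimension > 0
--     reduced = list(tensor_idx)[:1] + list(tensor_idx)[2:]
--     acc = 0
--     for idx in reversed(reduced):
--         acc = acc * dimension + idx
--     if dimension == 1 or len(tensor_idx) == 1:
--         return (acc,)
--     return (acc, tensor_idx[1])
-- ===== Notes on version B (the rewrite author's own statement) =====
-- stated objective: faster
-- what changed: B replaces the enumerate loop that recomputes dimension**i at every position with Horner's method over the reduced index reversed (acc = acc*dimension + idx), building the reduced index by slicing instead of del, so no power is ever formed.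
import Mathlib
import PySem

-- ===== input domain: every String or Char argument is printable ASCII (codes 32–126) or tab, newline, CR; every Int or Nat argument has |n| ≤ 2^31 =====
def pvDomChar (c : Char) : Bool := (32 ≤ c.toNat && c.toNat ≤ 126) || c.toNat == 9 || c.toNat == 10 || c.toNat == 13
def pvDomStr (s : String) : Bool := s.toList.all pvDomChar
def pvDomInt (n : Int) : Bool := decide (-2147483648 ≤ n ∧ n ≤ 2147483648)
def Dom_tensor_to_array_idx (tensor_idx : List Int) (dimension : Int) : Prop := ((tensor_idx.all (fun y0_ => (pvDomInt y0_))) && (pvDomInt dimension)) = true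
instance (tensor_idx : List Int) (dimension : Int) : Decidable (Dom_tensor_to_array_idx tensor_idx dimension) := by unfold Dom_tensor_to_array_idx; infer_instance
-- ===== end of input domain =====

-- B converts the reduced index with Horner's method (acc = acc*dimension + idx over the
-- reversed digits) instead of summing idx * dimension**i; same return shape and values.

-- ===== PORT A =====
-- the 'for i, idx in enumerate(reduced)' loop: carries the enumerate counter i and the accumulator
def pvALoop (d : Int) : List Int → Nat → Int → Int
  | [], _, acc => acc
  | idx :: rest, i, acc => pvALoop d rest (i + 1) (acc + idx * d ^ i)

def tensor_to_array_idx (tensor_idx : List Int) (dimension : Int) : List Int :=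
  -- reduced_tensor_idx = list(tensor_idx); if len > 1: del reduced_tensor_idx[1]
  let reduced := if tensor_idx.length > 1 then tensor_idx.eraseIdx 1 else tensor_idx
  let decimal_expansion := pvALoop dimension reduced 0 0
  if dimension = 1 ∨ tensor_idx.length = 1 then
    [decimal_expansion]
  else
    -- tensor_idx[1]; in-range whenever Pre_ holds and this branch is taken
    [decimal_expansion, (PySem.List.pyGet? tensor_idx 1).getD 0]

-- ===== PORT B =====
def tensor_to_array_idx_alt (tensor_idx : List Int) (dimension : Int) : List Int :=
  -- tensor_idx[:1] + tensor_idx[2:], nonnegative-bound slices = take/drop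
  let reduced := tensor_idx.take 1 ++ tensor_idx.drop 2
  -- Horner: for idx in reversed(reduced): acc = acc*dimension + idx
  let acc := reduced.reverse.foldl (fun a idx => a * dimension + idx) 0
  if dimension = 1 ∨ tensor_idx.length = 1 then
    [acc]
  else
    [acc, (PySem.List.pyGet? tensor_idx 1).getD 0]

-- ===== PRECONDITION & SPEC =====
-- A raises AssertionError on an empty tensor_idx and on dimension ≤ 0; exactly those are excluded.
def Pre_tensor_to_array_idx (tensor_idx : List Int) (dimension : Int) : Prop :=
  tensor_idx ≠ [] ∧ 0 < dimension
instance (tensor_idx : List Int) (dimension : Int) : Decidable (Pre_tensor_to_array_idx tensor_idx dimension) := by unfold Pre_tensor_to_array_idx; infer_instance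

def pvWitness_tensor_to_array_idx : List Int × Int := ([2, 1, 0], 3)

def Spec_tensor_to_array_idx (tensor_idx : List Int) (dimension : Int) (out : List Int) : Prop := out = tensor_to_array_idx_alt tensor_idx dimension
instance (tensor_idx : List Int) (dimension : Int) (out : List Int) : Decidable (Spec_tensor_to_array_idx tensor_idx dimension out) := by unfold Spec_tensor_to_array_idx; infer_instance

-- ===== CLAIM (what is proved, stated in full; the proofs are below) =====
def Claim_equal_tensor_to_array_idx : Prop := ∀ (tensor_idx : List Int) (dimension : Int), Dom_tensor_to_array_idx tensor_idx dimension → Pre_tensor_to_array_idx tensor_idx dimension → Spec_tensor_to_array_idx tensor_idx dimension (tensor_to_array_idx tensor_idx dimension)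

-- ===== LEMMAS AND PROOFS =====
-- the common value of both loops: val d [x0,…,xk] = Σ xi·d^i, written recursively
def pvVal (d : Int) : List Int → Int
  | [] => 0
  | x :: xs => x + d * pvVal d xs

theorem pvALoop_eq (d : Int) : ∀ (xs : List Int) (i : Nat) (acc : Int),
    pvALoop d xs i acc = acc + d ^ i * pvVal d xs := by
  intro xs
  induction xs with
  | nil => intro i acc; simp [pvALoop, pvVal]
  | cons x rest ih =>
    intro i acc
    simp [pvALoop, pvVal, ih, pow_succ]
    ring

-- foldl over the reverse is foldr with flipped arguments; stated in foldr form so simp can use it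
theorem pvHorner_eq (d : Int) : ∀ (xs : List Int),
    xs.foldr (fun idx a => a * d + idx) 0 = pvVal d xs := by
  intro xs
  induction xs with
  | nil => simp [pvVal]
  | cons x rest ih =>
    simp [pvVal, ih]
    ring

theorem tensor_to_array_idx_spec : Claim_equal_tensor_to_array_idx := by
  intro t d _ hpre
  obtain ⟨hne, _⟩ := hpre
  unfold Spec_tensor_to_array_idx tensor_to_array_idx tensor_to_array_idx_alt
  match t, hne with
  | [x], _ =>
    simp [pvALoop_eq, pvVal]
  | x :: y :: rest, _ =>
    have hred : (x :: y :: rest).eraseIdx 1 = x :: rest := rfl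
    simp [hred, pvALoop_eq, pvHorner_eq, pvVal]
    split_ifs <;> simp <;> ring

-- ===== VERDICT (by name: the statement is the Claim_ definition above) =====
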